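-- pv_equiv track=rewrite | github.com/allanRoberto/revesbot-final | apps/signals/patterns/blackhorse.py | build_bet_set
-- ===== SOURCE A (Python) =====
-- from typing import List, Dict, Optional
--
-- def build_bet_set(target_group: int) -> List[int]:
--     """
--     Constroi o conjunto de numeros para apostar baseado no grupo alvo.
--
--     Args:
--         target_group: 1 para cavalo 147, 2 para cavalo 258
--
--     Returns:
--         Lista ordenada de numeros para apostar
--     """
--     if target_group == 1:
--         targets = [1, 4, 7]
--         protection = 10
--     elif target_group == 2:
--         targets = [2, 5, 8]
--         protection = 20
--     else:
--         return []
--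
--     bet_set = {0, protection}
--     for t in targets:
--         for n in range(1, 37):
--             if n % 10 == t:
--                 bet_set.add(n)
--
--     return sorted(list(bet_set))
-- ===== SOURCE B (Python) =====
-- def build_bet_set(target_group: int):
--     groups = {1: [1, 4, 7], 2: [2, 5, 8]}
--     if target_group not in groups:
--         return []
--     nums = {0, 10 * target_group}
--     for t in groups[target_group]:
--         for k in range(4):
--             v = t + 10 * k
--             if v <= 36:
--                 nums.add(v)
--     return sorted(nums)
-- ===== Notes on version B (the rewrite author's own statement) =====
-- stated objective: simpler
-- what changed: Replaces A's hard-coded protection branches and the 36-element scan-and-filter per target (n in 1..36 with n % 10 == t) with a dict lookup of the target list and a direct arithmetic enumeration t + 10*k for k in 0..3 capped at 36.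
import Mathlib
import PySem

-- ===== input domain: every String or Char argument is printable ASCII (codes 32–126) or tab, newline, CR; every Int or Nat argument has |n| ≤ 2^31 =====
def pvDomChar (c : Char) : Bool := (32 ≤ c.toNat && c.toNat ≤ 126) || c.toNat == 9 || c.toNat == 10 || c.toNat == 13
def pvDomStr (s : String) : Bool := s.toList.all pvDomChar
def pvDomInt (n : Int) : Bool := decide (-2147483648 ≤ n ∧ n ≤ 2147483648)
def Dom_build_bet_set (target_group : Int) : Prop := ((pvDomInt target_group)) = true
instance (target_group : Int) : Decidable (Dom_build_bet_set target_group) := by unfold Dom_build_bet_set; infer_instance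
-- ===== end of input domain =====

-- B replaces A's scan of 1..36 filtered by n % 10 == t with a direct arithmetic
-- enumeration t + 10*k (k = 0..3, kept while ≤ 36); objective: simpler.

-- ===== PORT A =====
-- A picks (targets, protection) per group, seeds {0, protection}, then for each
-- target scans n in range(1,37) adding n when n % 10 == t, and returns sorted(set).
def build_bet_set (target_group : Int) : List Int :=
  match (if target_group == 1 then some (([1, 4, 7] : List Int), (10 : Int))
         else if target_group == 2 then some (([2, 5, 8] : List Int), (20 : Int))
         else none) with
  | none => []
  | some (targets, protection) =>
    let bet_set : PySem.Set Int := PySem.Set.ofList [0, protection]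
    let bet_set := targets.foldl (fun s t =>
      (PySem.List.pyRange 1 37 1).foldl (fun s n =>
        if PySem.Int.mod n 10 == t then PySem.Set.add s n else s) s) bet_set
    PySem.List.sorted bet_set (fun x => x) false

-- ===== PORT B =====
-- B seeds {0, 10*target_group} and adds t + 10*k for each target and k in range(4), capped at 36.
def build_bet_set_alt (target_group : Int) : List Int :=
  let groups : PySem.Dict Int (List Int) := PySem.Dict.mk [(1, [1, 4, 7]), (2, [2, 5, 8])]
  match PySem.Dict.get? groups target_group with
  | none => []
  | some targets =>
    let nums : PySem.Set Int := PySem.Set.ofList [0, 10 * target_group]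
    let nums := targets.foldl (fun s t =>
      (PySem.List.pyRange 0 4 1).foldl (fun s k =>
        let v := t + 10 * k
        if v ≤ 36 then PySem.Set.add s v else s) s) nums
    PySem.List.sorted nums (fun x => x) false

-- ===== PRECONDITION & SPEC =====
def Spec_build_bet_set (target_group : Int) (out : List Int) : Prop := out = build_bet_set_alt target_group
instance (target_group : Int) (out : List Int) : Decidable (Spec_build_bet_set target_group out) := by unfold Spec_build_bet_set; infer_instance

-- ===== CLAIM (what is proved, stated in full; the proofs are below) =====
def Claim_equal_build_bet_set : Prop := ∀ (target_group : Int), Dom_build_bet_set target_group → Spec_build_bet_set target_group (build_bet_set target_group)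

-- ===== LEMMAS AND PROOFS =====

-- ===== VERDICT (by name: the statement is the Claim_ definition above) =====
theorem build_bet_set_spec : Claim_equal_build_bet_set := by
  intro g _
  unfold Spec_build_bet_set
  by_cases h1 : g = 1
  · subst h1; decide
  · by_cases h2 : g = 2
    · subst h2; decide
    · have e1 : ((1:Int) == g) = false := by simp [Ne.symm h1]
      have e2 : ((2:Int) == g) = false := by simp [Ne.symm h2]
      simp [build_bet_set, build_bet_set_alt, h1, h2, e1, e2, PySem.Dict.get?]
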